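-- pv_equiv track=rewrite | github.com/mtakeshi1/pythonexperiments | leetcode/p2306.py | distinctNames3
-- ===== SOURCE A (Python) =====
-- from typing import List
--
-- def distinctNames3(ideas: List[str]) -> int:
--     c = 0
--     suffixes = dict()
--     for name in ideas:
--         suffixes.setdefault(name[1:], set()).add(name[0])
--
--     for suffix, letters in suffixes.items():
--         for other, other_letters in suffixes.items():
--             if other != suffix:
--                 c += len(letters - other_letters) * len(other_letters - letters)
--     return c
-- ===== SOURCE B (Python) =====
-- from typing import List
--
-- def distinctNames3(ideas: List[str]) -> int:
--     groups = {}
--     for name in ideas: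
--         groups.setdefault(name[1:], set()).add(name[0])
--     sets = list(groups.values())
--     alphabet = sorted({name[0] for name in ideas})
--
--     def cnt(a, b):
--         return sum(1 for L in sets if a in L and b not in L)
--
--     return sum(cnt(a, b) * cnt(b, a) for a in alphabet for b in alphabet)
-- ===== Notes on version B (the rewrite author's own statement) =====
-- stated objective: faster
-- what changed: Instead of comparing every ordered pair of suffix groups with set differences (quadratic in the number of groups), B counts, for each ordered pair of first letters (a,b), the groups containing a but not b, and sums cnt(a,b)*cnt(b,a) over letter pairs.
import Mathlib
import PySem

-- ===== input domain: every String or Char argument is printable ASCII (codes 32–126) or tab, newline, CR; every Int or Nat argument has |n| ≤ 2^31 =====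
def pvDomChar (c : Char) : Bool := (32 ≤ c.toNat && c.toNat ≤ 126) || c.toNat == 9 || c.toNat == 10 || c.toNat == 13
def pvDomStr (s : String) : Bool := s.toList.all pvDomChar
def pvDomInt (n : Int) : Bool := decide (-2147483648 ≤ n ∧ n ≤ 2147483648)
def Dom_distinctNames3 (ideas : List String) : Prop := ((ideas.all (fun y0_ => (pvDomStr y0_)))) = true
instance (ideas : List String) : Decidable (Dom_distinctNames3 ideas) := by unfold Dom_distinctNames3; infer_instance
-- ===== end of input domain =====

-- B replaces A's quadratic scan over all pairs of suffix groups by counting, per ordered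
-- letter pair (a,b), the groups containing a but not b (objective: faster on many groups).


-- ===== PORT A =====
-- name[0]; total form, exact because Pre_ excludes empty names
def pvFirst (name : String) : Char := PySem.List.pyGetD name.toList 0 ' '
-- name[1:]
def pvSuffix (name : String) : String := PySem.Str.slice name (some 1) none
-- suffixes.setdefault(name[1:], set()).add(name[0])  — the grouping loop body, literally
-- identical in A and in B (both Pythons contain this same loop), hence a shared helper
def pvStep (d : PySem.Dict String (PySem.Set Char)) (name : String) :
    PySem.Dict String (PySem.Set Char) :=
  d.modify (pvSuffix name) PySem.Set.empty (fun s => s.add (pvFirst name))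
def pvGroups (ideas : List String) : PySem.Dict String (PySem.Set Char) :=
  ideas.foldl pvStep PySem.Dict.empty

def distinctNames3 (ideas : List String) : Int :=
  let suffixes := pvGroups ideas
  suffixes.items.foldl (fun c pr =>
    suffixes.items.foldl (fun c qr =>
      if qr.1 ≠ pr.1 then
        c + PySem.Set.len (PySem.Set.diff pr.2 qr.2) * PySem.Set.len (PySem.Set.diff qr.2 pr.2)
      else c) c) 0

-- ===== PORT B =====
def distinctNames3_alt (ideas : List String) : Int :=
  let sets := (pvGroups ideas).values
  let alphabet := PySem.List.sorted (PySem.Set.ofList (ideas.map pvFirst)) (fun c => c) false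
  let cnt := fun (a b : Char) =>
    (sets.map (fun L =>
      if PySem.Set.contains L a && !(PySem.Set.contains L b) then (1 : Int) else 0)).sum
  (alphabet.map (fun a => (alphabet.map (fun b => cnt a b * cnt b a)).sum)).sum

-- ===== PRECONDITION & SPEC =====
-- Pre_ excludes lists containing an empty name: there name[0] raises IndexError in A (and in B).
def Pre_distinctNames3 (ideas : List String) : Prop := ∀ s ∈ ideas, s ≠ ""
instance (ideas : List String) : Decidable (Pre_distinctNames3 ideas) := by
  unfold Pre_distinctNames3; infer_instance
def pvWitness_distinctNames3 : List String := ["coffee", "donuts", "time", "toffee"]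

def Spec_distinctNames3 (ideas : List String) (out : Int) : Prop := out = distinctNames3_alt ideas
instance (ideas : List String) (out : Int) : Decidable (Spec_distinctNames3 ideas out) := by
  unfold Spec_distinctNames3; infer_instance

-- ===== CLAIM (what is proved, stated in full; the proofs are below) =====
def Claim_equal_distinctNames3 : Prop := ∀ (ideas : List String), Dom_distinctNames3 ideas → Pre_distinctNames3 ideas → Spec_distinctNames3 ideas (distinctNames3 ideas)

-- ===== LEMMAS AND PROOFS =====

-- 0/1 indicators used to relate the two counting schemes
def pvInd (L : PySem.Set Char) (a b : Char) : Int :=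
  if PySem.Set.contains L a && !(PySem.Set.contains L b) then 1 else 0
def pvInd2 (L M : PySem.Set Char) (a : Char) : Int :=
  if PySem.Set.contains L a && !(PySem.Set.contains M a) then 1 else 0
-- A's pairwise term
def pvD (L M : PySem.Set Char) : Int :=
  PySem.Set.len (PySem.Set.diff L M) * PySem.Set.len (PySem.Set.diff M L)

lemma pvFoldl_eq_add_sum {α : Type} (step : Int → α → Int) (g : α → Int)
    (h : ∀ c x, step c x = c + g x) (l : List α) (a : Int) :
    l.foldl step a = a + (l.map g).sum := by
  induction l generalizing a with
  | nil => simp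
  | cons x xs ih => simp [h, ih, add_assoc]

lemma pvSumSwap {α β : Type} (l1 : List α) (l2 : List β) (f : α → β → Int) :
    (l1.map (fun x => (l2.map (f x)).sum)).sum
      = (l2.map (fun y => (l1.map (fun x => f x y)).sum)).sum := by
  induction l1 with
  | nil => simp
  | cons x xs ih =>
      simp only [List.map_cons, List.sum_cons, ih]
      rw [← PySem.List.sum_map_add_int]

lemma pvSumMulSum {α β : Type} (l1 : List α) (l2 : List β) (f : α → Int) (g : β → Int) :
    (l1.map f).sum * (l2.map g).sum
      = (l1.map (fun x => (l2.map (fun y => f x * g y)).sum)).sum := by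
  induction l1 with
  | nil => simp
  | cons x xs ih =>
      simp only [List.map_cons, List.sum_cons, add_mul, ih, List.sum_map_mul_left]

-- the value invariant maintained by the grouping loop
def pvInv (d : PySem.Dict String (PySem.Set Char)) (F : List Char) : Prop :=
  ∀ k, (d.getD k PySem.Set.empty).Nodup ∧ ∀ c ∈ d.getD k PySem.Set.empty, c ∈ F

lemma pvInv_fold (F : List Char) (l : List String) (hF : ∀ n ∈ l, pvFirst n ∈ F)
    (d : PySem.Dict String (PySem.Set Char)) (hd : pvInv d F) :
    pvInv (l.foldl pvStep d) F := by
  induction l generalizing d with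
  | nil => exact hd
  | cons n ns ih =>
      refine ih (fun m hm => hF m (List.mem_cons_of_mem _ hm)) _ ?_
      intro k
      unfold pvStep
      rw [PySem.Dict.getD_modify]
      split_ifs with h
      · refine ⟨PySem.Set.nodup_add _ _ (hd _).1, fun c hc => ?_⟩
        rcases (PySem.Set.mem_add _ _ _).1 hc with h' | h'
        · exact (hd _).2 c h'
        · exact h' ▸ hF n List.mem_cons_self
      · exact hd k

lemma pvGroups_inv (ideas : List String) : pvInv (pvGroups ideas) (ideas.map pvFirst) := by
  refine pvInv_fold _ ideas (fun n hn => List.mem_map_of_mem hn) _ ?_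
  intro k
  constructor
  · simp [pysem, PySem.Set.empty]
  · intro c hc
    simp [pysem, PySem.Set.empty] at hc

lemma pvGroups_keys_nodup (ideas : List String) : (pvGroups ideas).keys.Nodup := by
  have h := PySem.Dict.nodup_keys_foldl_modify_key ideas pvSuffix PySem.Set.empty
    (fun _ n => fun s => s.add (pvFirst n)) PySem.Dict.empty PySem.Dict.nodup_keys_empty
  simpa [pvGroups, pvStep] using h

lemma pvKeyInj (ideas : List String) {p q : String × PySem.Set Char}
    (hp : p ∈ (pvGroups ideas).items) (hq : q ∈ (pvGroups ideas).items) (h : q.1 = p.1) :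
    q = p := by
  have hk := pvGroups_keys_nodup ideas
  simp only [PySem.Dict.keys] at hk
  exact List.inj_on_of_nodup_map hk hq hp h

lemma pvSets_nodup_sub (ideas : List String) :
    ∀ L ∈ (pvGroups ideas).values, L.Nodup ∧ ∀ c ∈ L, c ∈ ideas.map pvFirst := by
  intro L hL
  simp only [PySem.Dict.values] at hL
  obtain ⟨pr, hpr, rfl⟩ := List.mem_map.1 hL
  have hgd : (pvGroups ideas).getD pr.1 PySem.Set.empty = pr.2 :=
    PySem.Dict.getD_of_mem_items _ (by exact hpr) (pvGroups_keys_nodup ideas) _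
  have := pvGroups_inv ideas pr.1
  rw [hgd] at this
  exact this

lemma pvD_self (L : PySem.Set Char) : pvD L L = 0 := by
  have hd : PySem.Set.diff L L = [] := by
    simp only [PySem.Set.diff, List.filter_eq_nil_iff]
    intro a ha
    simp [PySem.Set.contains, ha]
  simp [pvD, hd, PySem.Set.len_eq]

-- A as a double sum over the group list
lemma pvA_eq (ideas : List String) :
    distinctNames3 ideas
      = (((pvGroups ideas).values).map (fun L =>
          (((pvGroups ideas).values).map (fun M => pvD L M)).sum)).sum := by
  unfold distinctNames3
  have hinner : ∀ (pr : String × PySem.Set Char) (c : Int),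
      ((pvGroups ideas).items).foldl (fun c qr =>
        if qr.1 ≠ pr.1 then c + pvD pr.2 qr.2 else c) c
        = c + (((pvGroups ideas).items).map
            (fun qr => if qr.1 ≠ pr.1 then pvD pr.2 qr.2 else 0)).sum := by
    intro pr c
    refine pvFoldl_eq_add_sum _ _ (fun c qr => ?_) _ c
    split_ifs <;> ring
  have houter := pvFoldl_eq_add_sum
    (fun c pr => ((pvGroups ideas).items).foldl (fun c qr =>
        if qr.1 ≠ pr.1 then c + pvD pr.2 qr.2 else c) c)
    (fun pr => (((pvGroups ideas).items).map
        (fun qr => if qr.1 ≠ pr.1 then pvD pr.2 qr.2 else 0)).sum)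
    (fun c pr => hinner pr c) ((pvGroups ideas).items) 0
  simp only [pvD] at houter ⊢
  rw [houter, zero_add]
  rw [show ((pvGroups ideas).values) = ((pvGroups ideas).items).map (fun x => x.2) from rfl]
  rw [List.map_map]
  refine congrArg List.sum (List.map_congr_left fun pr hpr => ?_)
  simp only [Function.comp]
  rw [List.map_map]
  refine congrArg List.sum (List.map_congr_left fun qr hqr => ?_)
  simp only [Function.comp]
  by_cases h : qr.1 = pr.1
  · have he : qr = pr := pvKeyInj ideas hpr hqr h
    have h0 := pvD_self pr.2
    simp only [pvD] at h0
    subst he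
    rw [if_neg (by simp)]
    exact h0.symm
  · simp [h]

lemma pvSwap4 {α β : Type} (l1 : List α) (l2 : List β) (f : α → α → β → β → Int) :
    (l1.map (fun a => (l1.map (fun b =>
        (l2.map (fun L => (l2.map (fun M => f a b L M)).sum)).sum)).sum)).sum
      = (l2.map (fun L => (l2.map (fun M =>
          (l1.map (fun a => (l1.map (fun b => f a b L M)).sum)).sum)).sum)).sum := by
  calc
    _ = (l1.map (fun a => (l2.map (fun L => (l1.map (fun b =>
          (l2.map (fun M => f a b L M)).sum)).sum)).sum)).sum := by
          refine congrArg List.sum (List.map_congr_left fun a _ => ?_)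
          exact pvSumSwap l1 l2 _
    _ = (l2.map (fun L => (l1.map (fun a => (l1.map (fun b =>
          (l2.map (fun M => f a b L M)).sum)).sum)).sum)).sum := pvSumSwap l1 l2 _
    _ = (l2.map (fun L => (l1.map (fun a => (l2.map (fun M =>
          (l1.map (fun b => f a b L M)).sum)).sum)).sum)).sum := by
          refine congrArg List.sum (List.map_congr_left fun L _ => ?_)
          refine congrArg List.sum (List.map_congr_left fun a _ => ?_)
          exact pvSumSwap l1 l2 _
    _ = _ := by
          refine congrArg List.sum (List.map_congr_left fun L _ => ?_)
          exact pvSumSwap l1 l2 _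

-- B as the quadruple sum ordered groups-first
lemma pvB_eq (ideas : List String) :
    distinctNames3_alt ideas
      = (((pvGroups ideas).values).map (fun L => (((pvGroups ideas).values).map (fun M =>
          ((PySem.List.sorted (PySem.Set.ofList (ideas.map pvFirst)) (fun c => c) false).map (fun a =>
            ((PySem.List.sorted (PySem.Set.ofList (ideas.map pvFirst)) (fun c => c) false).map (fun b =>
              pvInd L a b * pvInd M b a)).sum)).sum)).sum)).sum := by
  calc
    distinctNames3_alt ideas
      = ((PySem.List.sorted (PySem.Set.ofList (ideas.map pvFirst)) (fun c => c) false).map (fun a =>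
          ((PySem.List.sorted (PySem.Set.ofList (ideas.map pvFirst)) (fun c => c) false).map (fun b =>
            (((pvGroups ideas).values).map (fun L => pvInd L a b)).sum
              * (((pvGroups ideas).values).map (fun M => pvInd M b a)).sum)).sum)).sum := rfl
    _ = ((PySem.List.sorted (PySem.Set.ofList (ideas.map pvFirst)) (fun c => c) false).map (fun a =>
          ((PySem.List.sorted (PySem.Set.ofList (ideas.map pvFirst)) (fun c => c) false).map (fun b =>
            (((pvGroups ideas).values).map (fun L => (((pvGroups ideas).values).map (fun M =>
              pvInd L a b * pvInd M b a)).sum)).sum)).sum)).sum := by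
          refine congrArg List.sum (List.map_congr_left fun a _ => ?_)
          refine congrArg List.sum (List.map_congr_left fun b _ => ?_)
          exact pvSumMulSum _ _ _ _
    _ = _ := pvSwap4 _ _ _

lemma pvInd_prod (L M : PySem.Set Char) (a b : Char) :
    pvInd L a b * pvInd M b a = pvInd2 L M a * pvInd2 M L b := by
  by_cases h1 : a ∈ L <;> by_cases h2 : b ∈ L <;> by_cases h3 : a ∈ M <;> by_cases h4 : b ∈ M <;>
    simp [pvInd, pvInd2, PySem.Set.contains, h1, h2, h3, h4]

lemma pvLen_diff (al : List Char) (hal : al.Nodup) (L M : PySem.Set Char)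
    (hLn : L.Nodup) (hsub : ∀ c ∈ L, c ∈ al) :
    (al.map (pvInd2 L M)).sum = PySem.Set.len (PySem.Set.diff L M) := by
  have h1 : (al.map (pvInd2 L M)).sum
      = ((al.countP (fun a => PySem.Set.contains L a && !(PySem.Set.contains M a)) : Nat) : Int) :=
    PySem.List.sum_map_ite_one_zero _ al
  rw [h1, PySem.Set.len_eq]
  congr 1
  have hperm : (al.filter (fun a => PySem.Set.contains L a)).Perm L := by
    rw [List.perm_ext_iff_of_nodup (hal.filter _) hLn]
    intro a
    simp only [List.mem_filter]
    constructor
    · intro h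
      simpa [PySem.Set.contains, List.contains_iff_mem] using h.2
    · intro ha
      exact ⟨hsub a ha, by simpa [PySem.Set.contains, List.contains_iff_mem] using ha⟩
  calc al.countP (fun a => PySem.Set.contains L a && !(PySem.Set.contains M a))
      = al.countP (fun a => !(PySem.Set.contains M a) && PySem.Set.contains L a) := by
        simp only [Bool.and_comm]
    _ = (al.filter (fun a => PySem.Set.contains L a)).countP
          (fun a => !(PySem.Set.contains M a)) := List.countP_filter.symm
    _ = L.countP (fun a => !(PySem.Set.contains M a)) :=
          List.Perm.countP_congr hperm (fun x _ => rfl)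
    _ = (L.filter (fun a => !(PySem.Set.contains M a))).length :=
          List.countP_eq_length_filter
    _ = (PySem.Set.diff L M).length := rfl

-- ===== VERDICT (by name: the statement is the Claim_ definition above) =====
theorem distinctNames3_spec : Claim_equal_distinctNames3 := by
  intro ideas _ _
  unfold Spec_distinctNames3
  rw [pvA_eq, pvB_eq]
  refine congrArg List.sum (List.map_congr_left fun L hL => ?_)
  refine congrArg List.sum (List.map_congr_left fun M hM => ?_)
  obtain ⟨hLn, hLs⟩ := pvSets_nodup_sub ideas L hL
  obtain ⟨hMn, hMs⟩ := pvSets_nodup_sub ideas M hM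
  have hal_nodup : (PySem.List.sorted (PySem.Set.ofList (ideas.map pvFirst))
      (fun c => c) false).Nodup :=
    (PySem.List.sorted_perm _ _ _).symm.nodup (PySem.Set.nodup_ofList _)
  have hmem : ∀ c, c ∈ ideas.map pvFirst →
      c ∈ PySem.List.sorted (PySem.Set.ofList (ideas.map pvFirst)) (fun c => c) false := by
    intro c hc
    rw [PySem.List.mem_sorted]
    exact (PySem.Set.mem_ofList _ _).2 hc
  calc pvD L M
      = ((PySem.List.sorted (PySem.Set.ofList (ideas.map pvFirst)) (fun c => c) false).map
          (pvInd2 L M)).sum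
        * ((PySem.List.sorted (PySem.Set.ofList (ideas.map pvFirst)) (fun c => c) false).map
          (pvInd2 M L)).sum := by
        unfold pvD
        rw [pvLen_diff _ hal_nodup L M hLn (fun c hc => hmem c (hLs c hc)),
            pvLen_diff _ hal_nodup M L hMn (fun c hc => hmem c (hMs c hc))]
    _ = _ := by
        rw [pvSumMulSum]
        refine congrArg List.sum (List.map_congr_left fun a _ => ?_)
        refine congrArg List.sum (List.map_congr_left fun b _ => ?_)
        exact (pvInd_prod L M a b).symm
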